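-- pv_equiv track=rewrite | github.com/niboon39/Codewars | main.py | solution_split_sting
-- ===== SOURCE A (Python) =====
-- def solution_split_sting(s):
--   re_list = [] # result of list
--
--   if len(s) % 2 == 0 :
--     for i in range(len(s)+1):
--       if i>=2 and i % 2 == 0 :
--         ss = s[i-2]+s[i-1]
--         re_list.append(ss)
--   else:
--     for i in range(len(s)+1):
--       if i>=2 and i % 2 == 0 :
--         ss = s[i-2]+s[i-1]
--         re_list.append(ss)
--     sso = s[len(s)-1] + '_'
--     re_list.append(sso)
--   return re_list
-- ===== SOURCE B (Python) =====
-- def solution_split_sting(s):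
--     out = []
--     it = iter(s)
--     for a in it:
--         b = next(it, '_')
--         out.append(a + b)
--     return out
-- ===== Notes on version B (the rewrite author's own statement) =====
-- stated objective: simpler
-- what changed: Replaces A's index loop over range(len(s)+1) with its parity guard, duplicated even/odd branches and pair rebuilding from s[i-2]+s[i-1] by a single pass that consumes the characters two at a time, padding the lone last character inline.
import Mathlib
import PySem

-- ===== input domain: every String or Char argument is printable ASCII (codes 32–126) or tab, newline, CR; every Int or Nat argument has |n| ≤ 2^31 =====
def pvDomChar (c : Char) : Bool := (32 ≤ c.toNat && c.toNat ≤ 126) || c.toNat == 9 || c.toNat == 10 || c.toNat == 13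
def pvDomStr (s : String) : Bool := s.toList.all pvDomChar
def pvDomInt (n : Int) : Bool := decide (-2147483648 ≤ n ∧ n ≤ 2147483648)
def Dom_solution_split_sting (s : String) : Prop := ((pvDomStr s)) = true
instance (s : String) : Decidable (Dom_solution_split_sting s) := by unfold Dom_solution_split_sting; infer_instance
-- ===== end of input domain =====

-- B replaces A's index loop (parity guard, duplicated even/odd branches) by consuming the
-- characters two at a time, padding the lone last one inline; objective: simpler.

-- ===== PORT A =====
-- one loop step of A's 'for i in range(len(s)+1)' body (identical in both of A's branches)
def pvStepA (cs : List Char) (acc : List String) (i : Int) : List String :=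
  if 2 ≤ i ∧ i % 2 = 0 then
    acc ++ [match PySem.List.pyGet? cs (i - 2), PySem.List.pyGet? cs (i - 1) with
            | some a, some b => String.ofList [a, b]
            | _, _ => ""]
  else acc

def solution_split_sting (s : String) : List String :=
  let cs := s.toList
  if cs.length % 2 = 0 then
    (PySem.List.pyRange 0 ((cs.length : Int) + 1) 1).foldl (pvStepA cs) []
  else
    let r := (PySem.List.pyRange 0 ((cs.length : Int) + 1) 1).foldl (pvStepA cs) []
    let sso := match PySem.List.pyGet? cs ((cs.length : Int) - 1) with
               | some a => String.ofList [a, '_']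
               | none => ""
    r ++ [sso]

-- ===== PORT B =====
-- Source B pulls characters pairwise from one iterator: take two at a time, '_' when the second is missing
def pvChunk2 : List Char → List String
  | [] => []
  | [a] => [String.ofList [a, '_']]
  | a :: b :: rest => String.ofList [a, b] :: pvChunk2 rest

def solution_split_sting_alt (s : String) : List String := pvChunk2 s.toList

-- ===== PRECONDITION & SPEC =====
def Spec_solution_split_sting (s : String) (out : List String) : Prop := out = solution_split_sting_alt s
instance (s : String) (out : List String) : Decidable (Spec_solution_split_sting s out) := by unfold Spec_solution_split_sting; infer_instance

-- ===== CLAIM (what is proved, stated in full; the proofs are below) =====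
def Claim_equal_solution_split_sting : Prop := ∀ (s : String), Dom_solution_split_sting s → Spec_solution_split_sting s (solution_split_sting s)

-- ===== LEMMAS AND PROOFS =====

-- the pairs A's loop has produced after the indices 0 .. 2*k
def pvPairF (cs : List Char) (j : Nat) : String := String.ofList [cs.getD (2 * j) ' ', cs.getD (2 * j + 1) ' ']
def pvPairsIdx (cs : List Char) (k : Nat) : List String := (List.range k).map (pvPairF cs)

lemma pvLoopA (cs : List Char) (k : Nat) (hk : 2 * k ≤ cs.length) (acc : List String) :
    (PySem.List.pyRange 0 (2 * (k : Int) + 1) 1).foldl (pvStepA cs) acc = acc ++ pvPairsIdx cs k := by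
  induction k generalizing acc with
  | zero =>
    rw [show 2 * ((0 : Nat) : Int) + 1 = 0 + 1 by norm_num, PySem.List.pyRange_one_singleton]
    simp [pvStepA, pvPairsIdx]
  | succ k ih =>
    have hk' : 2 * k ≤ cs.length := by omega
    have h2k1 : 2 * (k : Int) + 1 < cs.length := by omega
    have hsplit : PySem.List.pyRange 0 (2 * ((k : Int) + 1) + 1) 1
        = (PySem.List.pyRange 0 (2 * (k : Int) + 1) 1 ++ [2 * (k : Int) + 1]) ++ [2 * (k : Int) + 2] := by
      rw [show 2 * ((k : Int) + 1) + 1 = (2 * (k : Int) + 2) + 1 by ring,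
          PySem.List.pyRange_one_succ_right (by omega),
          show (2 : Int) * (k : Int) + 2 = (2 * (k : Int) + 1) + 1 by ring,
          PySem.List.pyRange_one_succ_right (by omega)]
    push_cast
    rw [hsplit, List.foldl_append, List.foldl_append, ih hk' _]
    have hodd : ¬ (2 ≤ 2 * (k : Int) + 1 ∧ (2 * (k : Int) + 1) % 2 = 0) := by omega
    have hg1 : PySem.List.pyGet? cs (2 * (k : Int) + 2 - 2) = some (cs.getD (2 * k) ' ') := by
      rw [show 2 * (k : Int) + 2 - 2 = ((2 * k : Nat) : Int) by push_cast; ring,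
          PySem.List.pyGet?_natCast, List.getElem?_eq_getElem (by omega),
          List.getD_eq_getElem cs ' ' (by omega)]
    have hg2 : PySem.List.pyGet? cs (2 * (k : Int) + 2 - 1) = some (cs.getD (2 * k + 1) ' ') := by
      rw [show 2 * (k : Int) + 2 - 1 = ((2 * k + 1 : Nat) : Int) by push_cast; ring,
          PySem.List.pyGet?_natCast, List.getElem?_eq_getElem (by omega),
          List.getD_eq_getElem cs ' ' (by omega)]
    simp only [List.foldl_cons, List.foldl_nil, pvStepA, if_neg hodd,
      if_pos (show 2 ≤ 2 * (k : Int) + 2 ∧ (2 * (k : Int) + 2) % 2 = 0 by omega), hg1, hg2]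
    simp [pvPairsIdx, List.range_succ, pvPairF]

lemma pvPairF_cons (a b : Char) (rest : List Char) (j : Nat) :
    pvPairF (a :: b :: rest) (j + 1) = pvPairF rest j := by
  rw [pvPairF, pvPairF, show 2 * (j + 1) = (2 * j).succ.succ by omega,
      show (2 * j).succ.succ + 1 = (2 * j + 1).succ.succ by omega]
  simp

lemma pvPairsIdx_cons (a b : Char) (rest : List Char) (k : Nat) :
    pvPairsIdx (a :: b :: rest) (k + 1) = String.ofList [a, b] :: pvPairsIdx rest k := by
  rw [pvPairsIdx, List.range_succ_eq_map, List.map_cons, List.map_map]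
  have h0 : pvPairF (a :: b :: rest) 0 = String.ofList [a, b] := by simp [pvPairF]
  rw [h0]
  simp only [Function.comp_def, Nat.succ_eq_add_one, pvPairsIdx]
  rw [List.map_congr_left (fun j _ => pvPairF_cons a b rest j)]

lemma pvChunk2_eq (cs : List Char) :
    pvChunk2 cs =
      if cs.length % 2 = 0 then pvPairsIdx cs (cs.length / 2)
      else pvPairsIdx cs (cs.length / 2) ++ [String.ofList [cs.getD (cs.length - 1) ' ', '_']] := by
  induction cs using pvChunk2.induct with
  | case1 => simp [pvChunk2, pvPairsIdx]
  | case2 a => simp [pvChunk2, pvPairsIdx]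
  | case3 a b rest ih =>
    have hlen : (a :: b :: rest).length = rest.length + 2 := by simp
    rw [pvChunk2, ih, hlen]
    have hdiv : (rest.length + 2) / 2 = rest.length / 2 + 1 := by omega
    have hmod : (rest.length + 2) % 2 = rest.length % 2 := by omega
    rw [hdiv, hmod, pvPairsIdx_cons]
    by_cases h : rest.length % 2 = 0
    · simp [h]
    · have hr : 1 ≤ rest.length := by omega
      rw [if_neg h, if_neg h,
          show rest.length + 2 - 1 = (rest.length - 1).succ.succ by omega]
      simp

-- ===== VERDICT (by name: the statement is the Claim_ definition above) =====
theorem solution_split_sting_spec : Claim_equal_solution_split_sting := by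
  intro s _
  unfold Spec_solution_split_sting solution_split_sting solution_split_sting_alt
  rw [pvChunk2_eq]
  set cs := s.toList with hcs
  by_cases h : cs.length % 2 = 0
  · rw [if_pos h, if_pos h]
    have hn : ((cs.length : Int) + 1) = 2 * ((cs.length / 2 : Nat) : Int) + 1 := by
      push_cast; omega
    rw [hn, pvLoopA cs (cs.length / 2) (by omega) []]
    simp
  · rw [if_neg h, if_neg h]
    have hn : ((cs.length : Int) + 1) = (2 * ((cs.length / 2 : Nat) : Int) + 1) + 1 := by
      push_cast; omega
    rw [hn, PySem.List.pyRange_one_succ_right (by positivity), List.foldl_append,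
        pvLoopA cs (cs.length / 2) (by omega) []]
    have hodd : ¬ (2 ≤ 2 * ((cs.length / 2 : Nat) : Int) + 1 ∧ (2 * ((cs.length / 2 : Nat) : Int) + 1) % 2 = 0) := by
      omega
    have hg : PySem.List.pyGet? cs ((cs.length : Int) - 1) = some (cs.getD (cs.length - 1) ' ') := by
      rw [show (cs.length : Int) - 1 = ((cs.length - 1 : Nat) : Int) by omega,
          PySem.List.pyGet?_natCast, List.getElem?_eq_getElem (by omega),
          List.getD_eq_getElem cs ' ' (by omega)]
    simp only [List.foldl_cons, List.foldl_nil, pvStepA, if_neg hodd, hg]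
    simp
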